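-- pv_equiv track=rewrite | github.com/pkg0203/Coding-Test | Programmers/Python/Lv.2/서버 증설 횟수/solution.py | solution
-- ===== SOURCE A (Python) =====
-- def solution(players, m, k):
--     answer = 0
--     on_server = [0 for i in range(len(players))]
--
--     for i in range(len(players)):
--         require_server = players[i] // m
--         # 서버 증축이 필요한 상황
--         if on_server[i] < require_server:
--             adding_server = require_server - on_server[i]
--             for j in range(k):
--                 if i + j < len(on_server):
--                     on_server[i + j] += adding_server
--             answer += adding_server
--     return answer
-- ===== SOURCE B (Python) =====
-- def solution(players, m, k):
--     # O(n) sweep: running count of active servers with an expiration (difference) array,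
--     # instead of A's O(n*k) re-update of a k-wide window per addition.
--     n = len(players)
--     expire = [0] * (n + 1)  # expire[t] = servers whose lifespan ends at hour t
--     active = 0
--     answer = 0
--     for i, p in enumerate(players):
--         active -= expire[i]
--         need = p // m
--         if active < need:
--             add = need - active
--             answer += add
--             if k > 0:
--                 active += add
--                 expire[min(i + k, n)] += add
--     return answer
-- ===== Notes on version B (the rewrite author's own statement) =====
-- stated objective: alternative
-- what changed: A re-adds the new servers to every slot of a k-wide window of an on_server array on each addition; B makes a single sweep keeping a running active-server count plus an expiration (difference) array indexed by the hour at which servers retire, doing constant work per addition.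
import Mathlib
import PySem

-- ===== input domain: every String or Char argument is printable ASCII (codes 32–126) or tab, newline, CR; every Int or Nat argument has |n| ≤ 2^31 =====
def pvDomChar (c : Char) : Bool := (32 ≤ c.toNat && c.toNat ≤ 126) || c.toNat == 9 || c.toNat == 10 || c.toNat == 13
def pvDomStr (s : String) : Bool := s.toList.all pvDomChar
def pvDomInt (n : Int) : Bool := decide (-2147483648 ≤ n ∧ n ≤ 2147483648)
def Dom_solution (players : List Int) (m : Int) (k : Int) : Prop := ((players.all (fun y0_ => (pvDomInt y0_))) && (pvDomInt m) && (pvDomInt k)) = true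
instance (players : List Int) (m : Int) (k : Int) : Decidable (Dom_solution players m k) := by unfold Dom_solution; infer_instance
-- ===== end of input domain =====

-- B replaces A's per-addition update of a k-wide window of an on_server array by a sweep
-- with a running active-server count and an expiration (difference) array; values agree for m ≠ 0.

-- ===== PORT A =====
-- inner loop body 'if i + j < len(on_server): on_server[i+j] += adding_server'
-- (indices i, i+j are nonnegative, so List.set / List.getD are exact for Python's
--  in-range element assignment/read)
def innerA (i : Nat) (add : Int) (os : List Int) (j : Nat) : List Int :=
  if i + j < os.length then os.set (i + j) (os.getD (i + j) 0 + add) else os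

-- one iteration of 'for i in range(len(players))'; i is a valid index so players.getD is
-- exact; 'for j in range(k)' with an Int k is List.range k.toNat (empty when k ≤ 0, exact)
def stepA (players : List Int) (m k : Int) (st : Int × List Int) (i : Nat) : Int × List Int :=
  let req := PySem.Int.floordiv (players.getD i 0) m
  if st.2.getD i 0 < req then
    let add := req - st.2.getD i 0
    (st.1 + add, (List.range k.toNat).foldl (innerA i add) st.2)
  else st

def solution (players : List Int) (m : Int) (k : Int) : Int :=
  ((List.range players.length).foldl (stepA players m k)
    (0, (List.range players.length).map (fun _ => (0 : Int)))).1

-- ===== PORT B =====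
-- one iteration of 'for i, p in enumerate(players)': state (expire, active, answer)
def stepB (n : Nat) (m k : Int) (st : List Int × Int × Int) (ip : Int × Int) : List Int × Int × Int :=
  let expire := st.1
  let active := st.2.1 - expire.getD ip.1.toNat 0
  let need := PySem.Int.floordiv ip.2 m
  if active < need then
    let add := need - active
    if k > 0 then
      let e := (min (ip.1 + k) (n : Int)).toNat
      (expire.set e (expire.getD e 0 + add), active + add, st.2.2 + add)
    else (expire, active, st.2.2 + add)
  else (expire, active, st.2.2)

def solution_alt (players : List Int) (m : Int) (k : Int) : Int :=
  ((PySem.List.enumerate players).foldl (stepB players.length m k)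
    (List.replicate (players.length + 1) 0, 0, 0)).2.2

-- ===== PRECONDITION & SPEC =====
-- Pre_ excludes exactly m = 0, where Python's 'players[i] // m' raises ZeroDivisionError (in both A and B).
def Pre_solution (players : List Int) (m : Int) (k : Int) : Prop := m ≠ 0
instance (players : List Int) (m : Int) (k : Int) : Decidable (Pre_solution players m k) := by unfold Pre_solution; infer_instance

def pvWitness_solution : List Int × Int × Int := ([10, 20, 30], 5, 2)

def Spec_solution (players : List Int) (m : Int) (k : Int) (out : Int) : Prop := out = solution_alt players m k
instance (players : List Int) (m : Int) (k : Int) (out : Int) : Decidable (Spec_solution players m k out) := by unfold Spec_solution; infer_instance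

-- ===== CLAIM (what is proved, stated in full; the proofs are below) =====
def Claim_equal_solution : Prop := ∀ (players : List Int) (m : Int) (k : Int), Dom_solution players m k → Pre_solution players m k → Spec_solution players m k (solution players m k)

-- ===== LEMMAS AND PROOFS =====

lemma getD_set_of_lt (xs : List Int) (e t : Nat) (v : Int) (h : e < xs.length) :
    (xs.set e v).getD t 0 = if t = e then v else xs.getD t 0 := by
  simp only [List.getD_eq_getElem?_getD, List.getElem?_set]
  by_cases h1 : t = e
  · simp [h1, h]
  · simp [h1, Ne.symm h1]

lemma innerA_len (i : Nat) (add : Int) (K : Nat) (os : List Int) :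
    ((List.range K).foldl (innerA i add) os).length = os.length := by
  induction K with
  | zero => rfl
  | succ K ih =>
      rw [List.range_succ, List.foldl_append]
      simp only [List.foldl_cons, List.foldl_nil, innerA]
      split_ifs with h
      · rw [List.length_set]; exact ih
      · exact ih

lemma innerA_getD (i : Nat) (add : Int) (K : Nat) (os : List Int) (t : Nat) :
    ((List.range K).foldl (innerA i add) os).getD t 0
      = if i ≤ t ∧ t < i + K ∧ t < os.length then os.getD t 0 + add else os.getD t 0 := by
  induction K generalizing t with
  | zero => simp; omega
  | succ K ih =>
      rw [List.range_succ, List.foldl_append]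
      simp only [List.foldl_cons, List.foldl_nil, innerA, innerA_len]
      by_cases h : i + K < os.length
      · rw [if_pos h, getD_set_of_lt _ _ _ _ (by rw [innerA_len]; exact h)]
        by_cases h1 : t = i + K
        · subst h1
          rw [if_pos rfl, ih, if_neg (by omega), if_pos (by omega)]
        · rw [if_neg h1, ih]
          split_ifs <;> first | rfl | omega
      · rw [if_neg h, ih]
        split_ifs <;> first | rfl | omega

lemma sum_Icc_bot (i j : Nat) (h : i ≤ j) (f : Nat → Int) :
    ∑ t ∈ Finset.Icc i j, f t = f i + ∑ t ∈ Finset.Icc (i + 1) j, f t := by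
  have hins : Finset.Icc i j = insert i (Finset.Icc (i + 1) j) := by
    ext x; simp [Finset.mem_Icc]; omega
  rw [hins, Finset.sum_insert (by simp)]

lemma loop_eq (players : List Int) (m k : Int) :
    ∀ (c i : Nat) (ans act : Int) (os expire : List Int),
      i + c = players.length →
      os.length = players.length →
      expire.length = players.length + 1 →
      (∀ j, i ≤ j → j < players.length →
        os.getD j 0 = act - ∑ t ∈ Finset.Icc i j, expire.getD t 0) →
      ((List.range' i c).foldl (stepA players m k) (ans, os)).1
        = ((PySem.List.enumerate (players.drop i) (i : Int)).foldl
            (stepB players.length m k) (expire, act, ans)).2.2 := by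
  intro c
  induction c with
  | zero =>
      intro i ans act os expire hc _ _ _
      rw [List.drop_eq_nil_of_le (by omega), PySem.List.enumerate_nil]
      rfl
  | succ c ih =>
      intro i ans act os expire hc hos hex hinv
      have hi : i < players.length := by omega
      rw [List.range'_succ, List.drop_eq_getElem_cons hi, PySem.List.enumerate_cons,
        List.foldl_cons, List.foldl_cons]
      have hp : players.getD i 0 = players[i] := List.getD_eq_getElem players 0 hi
      have hosi : os.getD i 0 = act - expire.getD i 0 := by
        have := hinv i le_rfl hi
        simpa [Finset.Icc_self] using this
      simp only [stepA, stepB, hp, Int.toNat_natCast]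
      by_cases hreq : os.getD i 0 < PySem.Int.floordiv players[i] m
      · -- addition branch
        rw [if_pos hreq, if_pos (by omega : act - expire.getD i 0 < PySem.Int.floordiv players[i] m)]
        by_cases hk : k > 0
        · rw [if_pos hk]
          have hE : (min ((i : Int) + k) (players.length : Int)).toNat
              = min (i + k.toNat) players.length := by omega
          set add := PySem.Int.floordiv players[i] m - os.getD i 0 with hadd
          have haddB : PySem.Int.floordiv players[i] m - (act - expire.getD i 0) = add := by omega
          rw [haddB, hE]
          set E := min (i + k.toNat) players.length with hEdef
          have hElt : E < expire.length := by omega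
          have := ih (i + 1) (ans + add) (act - expire.getD i 0 + add)
            ((List.range k.toNat).foldl (innerA i add) os)
            (expire.set E (expire.getD E 0 + add))
            (by omega) (by rw [innerA_len]; exact hos) (by rw [List.length_set]; exact hex)
            ?_
          · rw [Nat.cast_add, Nat.cast_one] at this
            exact this
          · intro j hj1 hj2
            rw [innerA_getD]
            have hsum : ∑ t ∈ Finset.Icc (i + 1) j, (expire.set E (expire.getD E 0 + add)).getD t 0
                = (∑ t ∈ Finset.Icc (i + 1) j, expire.getD t 0) + (if E ≤ j then add else 0) := by
              have h1 : ∀ t ∈ Finset.Icc (i + 1) j,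
                  (expire.set E (expire.getD E 0 + add)).getD t 0
                    = expire.getD t 0 + (if t = E then add else 0) := by
                intro t _
                rw [getD_set_of_lt _ _ _ _ hElt]
                split_ifs with h1 <;> simp [h1]
              rw [Finset.sum_congr rfl h1, Finset.sum_add_distrib,
                Finset.sum_ite_eq' _ E (fun _ => add)]
              congr 1
              simp only [Finset.mem_Icc]
              split_ifs <;> first | rfl | omega
            rw [hsum]
            have hold : os.getD j 0 = act - ∑ t ∈ Finset.Icc i j, expire.getD t 0 :=
              hinv j (by omega) hj2
            rw [sum_Icc_bot i j (by omega)] at hold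
            by_cases hC : j < i + k.toNat
            · rw [if_pos ⟨by omega, hC, by omega⟩, if_neg (by omega)]
              omega
            · rw [if_neg (by omega), if_pos (by omega)]
              omega
        · rw [if_neg hk]
          have hK0 : k.toNat = 0 := by omega
          rw [hK0]
          simp only [List.range_zero, List.foldl_nil]
          have := ih (i + 1) (ans + (PySem.Int.floordiv players[i] m - os.getD i 0))
            (act - expire.getD i 0) os expire (by omega) hos hex ?_
          · rw [Nat.cast_add, Nat.cast_one] at this
            rw [show PySem.Int.floordiv players[i] m - (act - expire.getD i 0)
              = PySem.Int.floordiv players[i] m - os.getD i 0 by omega]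
            exact this
          · intro j hj1 hj2
            rw [hinv j (by omega) hj2, sum_Icc_bot i j (by omega)]
            ring
      · -- no addition
        rw [if_neg hreq, if_neg (by omega : ¬ (act - expire.getD i 0 < PySem.Int.floordiv players[i] m))]
        have := ih (i + 1) ans (act - expire.getD i 0) os expire (by omega) hos hex ?_
        · rw [Nat.cast_add, Nat.cast_one] at this
          exact this
        · intro j hj1 hj2
          rw [hinv j (by omega) hj2, sum_Icc_bot i j (by omega)]
          ring

-- ===== VERDICT (by name: the statement is the Claim_ definition above) =====
theorem solution_spec : Claim_equal_solution := by
  intro players m k _ _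
  unfold Spec_solution solution solution_alt
  rw [List.range_eq_range']
  have h0 : ((0 : Nat) : Int) = (0 : Int) := rfl
  have := loop_eq players m k players.length 0 0 0
    ((List.range players.length).map (fun _ => (0 : Int)))
    (List.replicate (players.length + 1) 0)
    (by omega) (by simp) (by simp) ?_
  · simpa using this
  · intro j hj1 hj2
    have hl : ((List.range players.length).map (fun _ => (0 : Int))).getD j 0 = 0 := by
      simp [List.getD_eq_getElem?_getD]
    have hr : ∀ t ∈ Finset.Icc 0 j, (List.replicate (players.length + 1) (0 : Int)).getD t 0 = 0 := by
      intro t _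
      simp [List.getD_eq_getElem?_getD]
    rw [hl, Finset.sum_congr rfl hr]
    simp
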